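-- pv_equiv track=rewrite | github.com/raveena17/workout_problems | basic_python/Doubt.py | findBestUser
-- ===== SOURCE A (Python) =====
-- def findBestUser(userPrefs, allUsersPrefs):
--     ''' Given a list of user artist preferences and a
--         list of lists represented all stored users'
--         preferences, return the index of the stored
--         user with the most matches to the current user. '''
--     max_matches = 0
--     best_index = 0
--     for i in range(len(allUsersPrefs)):
--         curr_matches = countMatches(userPrefs,
--                                     allUsersPrefs[i])
--         if curr_matches > max_matches:
--             best_index = i
--             max_matches = curr_matches
--     return best_index
--
-- def countMatches(userPrefs,allUsersPrefs):
--     ''' return the number of elements that match between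
--         listA and listB '''
--     count = 0
--     for item in userPrefs:
--         if item in allUsersPrefs:
--             count += 1
--     return count
-- ===== SOURCE B (Python) =====
-- def findBestUser(userPrefs, allUsersPrefs):
--     ''' Given a list of user artist preferences and a
--         list of lists represented all stored users'
--         preferences, return the index of the stored
--         user with the most matches to the current user. '''
--     if not allUsersPrefs:
--         return 0
--     prefSets = [set(p) for p in allUsersPrefs]
--     counts = [0] * len(allUsersPrefs)
--     for artist in userPrefs:
--         counts = [c + 1 if artist in s else c for c, s in zip(counts, prefSets)]
--     return counts.index(max(counts))
-- ===== Notes on version B (the rewrite author's own statement) =====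
-- stated objective: faster
-- what changed: Replaces A's per-stored-user loop (a linear list-membership scan per artist, with a running max) by precomputed per-user sets, a counts vector updated column-wise once per artist, and a final first-argmax via index(max(counts)).
import Mathlib
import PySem

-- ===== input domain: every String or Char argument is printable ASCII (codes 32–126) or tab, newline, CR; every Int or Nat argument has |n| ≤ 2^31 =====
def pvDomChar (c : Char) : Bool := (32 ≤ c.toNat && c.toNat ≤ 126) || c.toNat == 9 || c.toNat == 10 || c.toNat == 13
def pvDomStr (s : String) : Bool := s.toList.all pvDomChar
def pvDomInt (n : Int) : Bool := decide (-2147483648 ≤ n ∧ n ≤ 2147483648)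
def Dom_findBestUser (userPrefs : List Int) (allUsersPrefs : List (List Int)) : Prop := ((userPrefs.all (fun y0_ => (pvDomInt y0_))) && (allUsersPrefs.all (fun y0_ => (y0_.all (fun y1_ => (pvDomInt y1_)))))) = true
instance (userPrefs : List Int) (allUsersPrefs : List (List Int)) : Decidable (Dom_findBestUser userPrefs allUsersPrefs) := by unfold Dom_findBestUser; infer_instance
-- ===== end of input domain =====

-- B replaces A's per-user membership-counting loop by per-user sets, a column-wise counts
-- vector updated once per artist, and a final first-argmax scan (objective: faster; measured).

-- ===== PORT A =====
def countMatches (userPrefs : List Int) (allUsersPrefs : List Int) : Int :=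
  userPrefs.foldl (fun count item => if item ∈ allUsersPrefs then count + 1 else count) 0

def findBestUser (userPrefs : List Int) (allUsersPrefs : List (List Int)) : Int :=
  let st := (PySem.List.pyRange 0 allUsersPrefs.length 1).foldl
    (fun (st : Int × Int) i =>
      let curr := countMatches userPrefs (PySem.List.pyGetD allUsersPrefs i [])
      if curr > st.1 then (curr, i) else st) (0, 0)
  st.2

-- ===== PORT B =====
def findBestUser_alt (userPrefs : List Int) (allUsersPrefs : List (List Int)) : Int :=
  if allUsersPrefs = [] then 0
  else
    let prefSets : List (PySem.Set Int) := allUsersPrefs.map (fun p => PySem.Set.ofList p)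
    let counts := userPrefs.foldl
      (fun cs artist => List.zipWith (fun c s => if PySem.Set.contains s artist then c + 1 else c) cs prefSets)
      (List.replicate allUsersPrefs.length (0 : Int))
    match PySem.List.max? counts (fun x => x) with
    | some m => ((PySem.List.index? counts m).getD 0 : Nat)
    | none => 0   -- unreachable: counts is nonempty in this branch

-- ===== PRECONDITION & SPEC =====
def Spec_findBestUser (userPrefs : List Int) (allUsersPrefs : List (List Int)) (out : Int) : Prop := out = findBestUser_alt userPrefs allUsersPrefs
instance (userPrefs : List Int) (allUsersPrefs : List (List Int)) (out : Int) : Decidable (Spec_findBestUser userPrefs allUsersPrefs out) := by unfold Spec_findBestUser; infer_instance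

-- ===== CLAIM (what is proved, stated in full; the proofs are below) =====
def Claim_equal_findBestUser : Prop := ∀ (userPrefs : List Int) (allUsersPrefs : List (List Int)), Dom_findBestUser userPrefs allUsersPrefs → Spec_findBestUser userPrefs allUsersPrefs (findBestUser userPrefs allUsersPrefs)

-- ===== LEMMAS AND PROOFS =====

theorem countMatches_eq_countP (us p : List Int) :
    countMatches us p = (us.countP (fun a => decide (a ∈ p)) : Int) := by
  unfold countMatches
  simpa using PySem.List.foldl_count_if (fun a => decide (a ∈ p)) us 0

theorem countMatches_nonneg (us p : List Int) : 0 ≤ countMatches us p := by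
  rw [countMatches_eq_countP]; positivity

theorem zip_id (cs : List Int) (L : List (List Int)) (h : cs.length = L.length) :
    List.zipWith (fun c (_ : List Int) => c) cs L = cs := by
  induction cs generalizing L with
  | nil => simp
  | cons c cs ih =>
    cases L with
    | nil => simp at h
    | cons p L => simp_all

theorem zip_zip (f : Int → List Int → Int) (g : Int → PySem.Set Int → Int)
    (cs : List Int) (L : List (List Int)) :
    List.zipWith f (List.zipWith g cs (L.map PySem.Set.ofList)) L
      = List.zipWith (fun c p => f (g c (PySem.Set.ofList p)) p) cs L := by
  induction cs generalizing L with
  | nil => simp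
  | cons c cs ih =>
    cases L with
    | nil => simp
    | cons p L => simp [ih]

theorem fold_zip (us : List Int) (L : List (List Int)) (cs : List Int)
    (h : cs.length = L.length) :
    us.foldl (fun cs artist => List.zipWith
        (fun c s => if PySem.Set.contains s artist then c + 1 else c) cs
        (L.map (fun p => PySem.Set.ofList p))) cs
      = List.zipWith (fun c p => c + (us.countP (fun a => decide (a ∈ p)) : Int)) cs L := by
  induction us generalizing cs with
  | nil => simpa using (zip_id cs L h).symm
  | cons a us ih =>
    simp only [List.foldl_cons]
    rw [ih _ (by simp [h]), zip_zip]
    congr 1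
    funext c p
    by_cases hp : a ∈ p <;>
      simp [PySem.Set.mem_ofList, hp]; ring

theorem zip_replicate (f : Int → List Int → Int) (L : List (List Int)) (x : Int) :
    List.zipWith f (List.replicate L.length x) L = L.map (f x) := by
  induction L with
  | nil => simp
  | cons p L ih => simp [List.replicate_succ, ih]

theorem enum_map (f : List Int → Int) (L : List (List Int)) (s : Int) :
    PySem.List.enumerate (L.map f) s
      = (PySem.List.enumerate L s).map (fun p => (p.1, f p.2)) := by
  induction L generalizing s with
  | nil => simp [PySem.List.enumerate_nil]
  | cons p L ih => simp [PySem.List.enumerate_cons, ih]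

theorem loop_nochange (ns : List Int) (k mx best : Int) (h : ∀ y ∈ ns, y ≤ mx) :
    (PySem.List.enumerate ns k).foldl
        (fun (st : Int × Int) p => if p.2 > st.1 then (p.2, p.1) else st) (mx, best)
      = (mx, best) := by
  induction ns generalizing k with
  | nil => simp [PySem.List.enumerate_nil]
  | cons c t ih =>
    have hc : ¬ c > mx := by have := h c (by simp); omega
    simp only [PySem.List.enumerate_cons, List.foldl_cons, hc, if_false]
    exact ih (k + 1) (fun y hy => h y (by simp [hy]))

theorem loop_first (ns : List Int) (k mx best M : Int) (hub : ∀ y ∈ ns, y ≤ M)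
    (hlt : mx < M) (hmem : M ∈ ns) :
    ((PySem.List.enumerate ns k).foldl
        (fun (st : Int × Int) p => if p.2 > st.1 then (p.2, p.1) else st) (mx, best)).2
      = k + (((PySem.List.index? ns M).getD 0 : Nat) : Int) := by
  induction ns generalizing k mx best with
  | nil => simp at hmem
  | cons c t ih =>
    by_cases hc : c = M
    · subst hc
      simp only [PySem.List.enumerate_cons, List.foldl_cons, PySem.List.index?_cons_self,
        if_pos hlt, gt_iff_lt]
      rw [loop_nochange t (k + 1) c k (fun y hy => hub y (by simp [hy]))]
      simp
    · have hmt : M ∈ t := by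
        rcases List.mem_cons.1 hmem with h | h
        · exact absurd h.symm hc
        · exact h
      have hsome : (PySem.List.index? t M).isSome := (PySem.List.index?_isSome_iff t M).2 hmt
      obtain ⟨j, hj⟩ := Option.isSome_iff_exists.1 hsome
      rw [PySem.List.index?_cons_of_ne t hc, hj]
      have hub' : ∀ y ∈ t, y ≤ M := fun y hy => hub y (by simp [hy])
      simp only [PySem.List.enumerate_cons, List.foldl_cons]
      by_cases hgt : c > mx
      · have hcM : c < M := lt_of_le_of_ne (hub c (by simp)) hc
        rw [if_pos hgt, ih (k + 1) c k hub' hcM hmt, hj]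
        simp; ring
      · rw [if_neg hgt, ih (k + 1) mx best hub' hlt hmt, hj]
        simp; ring

theorem findBestUser_as_loop (us : List Int) (L : List (List Int)) :
    findBestUser us L
      = ((PySem.List.enumerate (L.map (fun p => countMatches us p)) 0).foldl
          (fun (st : Int × Int) p => if p.2 > st.1 then (p.2, p.1) else st) (0, 0)).2 := by
  unfold findBestUser
  rw [enum_map, PySem.List.enumerate_eq_map_pyRange L ([] : List Int), List.map_map,
    List.foldl_map]
  rfl

-- ===== VERDICT (by name: the statement is the Claim_ definition above) =====
theorem findBestUser_spec : Claim_equal_findBestUser := by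
  intro us L _
  unfold Spec_findBestUser
  rw [findBestUser_as_loop]
  by_cases hL : L = []
  · subst hL; simp [findBestUser_alt, PySem.List.enumerate_nil]
  · simp only [findBestUser_alt, if_neg hL]
    rw [fold_zip us L (List.replicate L.length 0) (by simp), zip_replicate]
    have hz : (L.map fun p => (0 : Int) + ((us.countP (fun a => decide (a ∈ p)) : Nat) : Int))
        = L.map (fun p => countMatches us p) := by
      apply List.map_congr_left
      intro p _
      rw [countMatches_eq_countP]; ring
    rw [hz]
    set ns := L.map (fun p => countMatches us p) with hns
    have hne : ns ≠ [] := by simp [hns, hL]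
    have hnn : ∀ y ∈ ns, 0 ≤ y := by
      intro y hy
      simp only [hns, List.mem_map] at hy
      obtain ⟨p, _, rfl⟩ := hy
      exact countMatches_nonneg us p
    obtain ⟨M, hM⟩ : ∃ M, PySem.List.max? ns (fun x => x) = some M := by
      cases h : PySem.List.max? ns (fun x => x) with
      | none => exact absurd ((PySem.List.max?_eq_none_iff ns _).1 h) hne
      | some m => exact ⟨m, rfl⟩
    rw [hM]
    have hub : ∀ y ∈ ns, y ≤ M := PySem.List.max?_isMax hM
    have hmem : M ∈ ns := PySem.List.max?_mem hM
    by_cases hpos : 0 < M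
    · rw [loop_first ns 0 0 0 M hub hpos hmem]; ring
    · have hM0 : M = 0 := le_antisymm (by omega) (hnn M hmem)
      subst hM0
      rw [loop_nochange ns 0 0 0 hub]
      obtain ⟨c, t, hct⟩ := List.exists_cons_of_ne_nil hne
      have hc0 : c = 0 := le_antisymm (hub c (by simp [hct])) (hnn c (by simp [hct]))
      rw [hct, hc0]
      simp
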